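-- pv_equiv track=rewrite | github.com/cqfn/veniq | veniq/dataset_collection/dataflow/annotation.py | _get_last_line
-- ===== SOURCE A (Python) =====
-- def _get_last_line(text: str, start_line: int) -> int:
--     """
--     This function is aimed to find the last body line of
--     considered method. It work by counting the difference
--     in number of openning brackets '{' and closing brackets
--     '}'. It's start with the method declaration line and going
--     to the line where the difference is equal to 0. Which means
--     that we found closind bracket of method declaration.
--     """
--     file_lines = text.split('\n')
--     # to start counting opening brackets
--     difference_cases = 0
--
--     processed_declaration_line = file_lines[start_line - 1].split('//')[0]
--     difference_cases += processed_declaration_line.count('{')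
--     difference_cases -= processed_declaration_line.count('}')
--     for i, line in enumerate(file_lines[start_line:], start_line):
--         if difference_cases:
--             line_without_comments = line.split('//')[0]
--             difference_cases += line_without_comments.count('{')
--             difference_cases -= line_without_comments.count('}')
--         else:
--             # process comments to the last line of method
--             if line.strip() == '*/':
--                 return i + 2
--             else:
--                 return i
--
--     return -1
-- ===== SOURCE B (Python) =====
-- def _get_last_line(text: str, start_line: int) -> int:
--     lines = text.split('\n')
--
--     def delta(line):
--         code = line.split('//')[0]
--         return code.count('{') - code.count('}')
--
--     tail = lines[start_line:]
--     # prefix-sum table: sums[j] = balance seen just before tail[j]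
--     sums = [delta(lines[start_line - 1])]
--     for ln in tail:
--         sums.append(sums[-1] + delta(ln))
--     try:
--         j = sums[:-1].index(0)
--     except ValueError:
--         return -1
--     return start_line + j + 2 if tail[j].strip() == '*/' else start_line + j
-- ===== Notes on version B (the rewrite author's own statement) =====
-- stated objective: alternative
-- what changed: Replaces A's single guarded accumulating loop (early returns inside the iteration) by two phases: build the prefix-sum table of per-line brace deltas, then locate the first zero with list.index and map that position back to a line number.
-- outside the precondition, e.g. on _get_last_line('a', 3): A raises IndexError, B raises IndexError
import Mathlib
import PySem

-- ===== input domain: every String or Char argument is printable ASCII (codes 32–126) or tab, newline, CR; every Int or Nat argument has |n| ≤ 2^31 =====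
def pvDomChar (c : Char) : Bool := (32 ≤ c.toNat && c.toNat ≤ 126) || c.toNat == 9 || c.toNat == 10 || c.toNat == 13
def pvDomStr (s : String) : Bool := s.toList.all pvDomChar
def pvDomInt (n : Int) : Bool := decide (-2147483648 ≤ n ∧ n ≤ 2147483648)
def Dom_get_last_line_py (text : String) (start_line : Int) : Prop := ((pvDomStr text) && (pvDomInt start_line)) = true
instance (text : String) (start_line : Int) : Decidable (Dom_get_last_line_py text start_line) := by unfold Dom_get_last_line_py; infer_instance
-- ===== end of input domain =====

-- B replaces A's single guarded accumulating loop by a prefix-sum table plus a first-zero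
-- index lookup (objective: alternative decomposition, same cost).

-- ===== PORT A =====
-- A's for-loop with early returns, as structural recursion over the sliced lines
def get_last_line_py_loop : List String → Int → Int → Int
  | [], _, _ => -1
  | line :: rest, i, diff =>
    if diff ≠ 0 then
      let line_without_comments := PySem.List.pyGetD ((PySem.Str.split? line "//").getD []) 0 ""
      get_last_line_py_loop rest (i + 1)
        (diff + (PySem.Str.count line_without_comments "{" : Int)
              - (PySem.Str.count line_without_comments "}" : Int))
    else
      if PySem.Str.strip line = "*/" then i + 2 else i

def get_last_line_py (text : String) (start_line : Int) : Int :=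
  let file_lines := (PySem.Str.split? text "\n").getD []
  let processed_declaration_line :=
    PySem.List.pyGetD ((PySem.Str.split? (PySem.List.pyGetD file_lines (start_line - 1) "") "//").getD []) 0 ""
  let difference_cases : Int :=
    (PySem.Str.count processed_declaration_line "{" : Int)
      - (PySem.Str.count processed_declaration_line "}" : Int)
  get_last_line_py_loop (PySem.List.slice file_lines (some start_line) none) start_line difference_cases

-- ===== PORT B =====
def get_last_line_delta (line : String) : Int :=
  let code := PySem.List.pyGetD ((PySem.Str.split? line "//").getD []) 0 ""
  (PySem.Str.count code "{" : Int) - (PySem.Str.count code "}" : Int)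

def get_last_line_py_alt (text : String) (start_line : Int) : Int :=
  let lines := (PySem.Str.split? text "\n").getD []
  let tail := PySem.List.slice lines (some start_line) none
  let sums :=
    tail.foldl (fun acc ln => acc ++ [PySem.List.pyGetD acc (-1) 0 + get_last_line_delta ln])
      [get_last_line_delta (PySem.List.pyGetD lines (start_line - 1) "")]
  match PySem.List.index? (PySem.List.slice sums none (some (-1))) 0 with
  | none => -1
  | some j =>
      if PySem.Str.strip (PySem.List.pyGetD tail (j : Int) "") = "*/" then start_line + (j : Int) + 2
      else start_line + (j : Int)

-- ===== PRECONDITION & SPEC =====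
-- Pre_ excludes exactly the inputs where A raises IndexError on file_lines[start_line - 1]
def Pre_get_last_line_py (text : String) (start_line : Int) : Prop :=
  PySem.Raise.InRange ((PySem.Str.split? text "\n").getD []).length (start_line - 1)
instance (text : String) (start_line : Int) : Decidable (Pre_get_last_line_py text start_line) := by
  unfold Pre_get_last_line_py; infer_instance

def pvWitness_get_last_line_py : String × Int := ("a{\n}\nx", 1)

def Spec_get_last_line_py (text : String) (start_line : Int) (out : Int) : Prop := out = get_last_line_py_alt text start_line
instance (text : String) (start_line : Int) (out : Int) : Decidable (Spec_get_last_line_py text start_line out) := by unfold Spec_get_last_line_py; infer_instance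

-- ===== CLAIM (what is proved, stated in full; the proofs are below) =====
def Claim_equal_get_last_line_py : Prop := ∀ (text : String) (start_line : Int), Dom_get_last_line_py text start_line → Pre_get_last_line_py text start_line → Spec_get_last_line_py text start_line (get_last_line_py text start_line)

-- ===== LEMMAS AND PROOFS =====

-- the prefix-sum table B builds, in closed recursive form
def get_last_line_scan (d : Int) : List String → List Int
  | [] => [d]
  | l :: rest => d :: get_last_line_scan (d + get_last_line_delta l) rest

lemma scan_ne_nil (d : Int) (tail : List String) : get_last_line_scan d tail ≠ [] := by
  cases tail <;> simp [get_last_line_scan]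

lemma foldl_eq_scan (tail : List String) (pre : List Int) (d : Int) :
    tail.foldl (fun acc ln => acc ++ [PySem.List.pyGetD acc (-1) 0 + get_last_line_delta ln])
      (pre ++ [d]) = pre ++ get_last_line_scan d tail := by
  induction tail generalizing pre d with
  | nil => simp [get_last_line_scan]
  | cons l rest ih =>
    simp only [List.foldl_cons, get_last_line_scan]
    rw [PySem.List.pyGetD_neg_one_append_singleton]
    have := ih (pre ++ [d]) (d + get_last_line_delta l)
    simpa using this

lemma loop_eq_search (tail : List String) (i d : Int) :
    get_last_line_py_loop tail i d =
      match PySem.List.index? (get_last_line_scan d tail).dropLast 0 with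
      | none => -1
      | some j =>
          if PySem.Str.strip (PySem.List.pyGetD tail (j : Int) "") = "*/" then i + (j : Int) + 2
          else i + (j : Int) := by
  induction tail generalizing i d with
  | nil => simp [get_last_line_py_loop, get_last_line_scan, PySem.List.index?]
  | cons l rest ih =>
    by_cases hd : d = 0
    · subst hd
      have hdl : (get_last_line_scan 0 (l :: rest)).dropLast
          = 0 :: (get_last_line_scan (0 + get_last_line_delta l) rest).dropLast := by
        simp [get_last_line_scan, List.dropLast_cons_of_ne_nil (scan_ne_nil _ _)]
      rw [hdl, PySem.List.index?_cons_self]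
      simp [get_last_line_py_loop, PySem.List.pyGetD_zero_cons]
    · have hdl : (get_last_line_scan d (l :: rest)).dropLast
          = d :: (get_last_line_scan (d + get_last_line_delta l) rest).dropLast := by
        simp [get_last_line_scan, List.dropLast_cons_of_ne_nil (scan_ne_nil _ _)]
      rw [hdl, PySem.List.index?_cons_of_ne _ hd]
      have hA : get_last_line_py_loop (l :: rest) i d
          = get_last_line_py_loop rest (i + 1)
              (d + (PySem.Str.count (PySem.List.pyGetD ((PySem.Str.split? l "//").getD []) 0 "") "{" : Int)
                 - (PySem.Str.count (PySem.List.pyGetD ((PySem.Str.split? l "//").getD []) 0 "") "}" : Int)) := by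
        simp [get_last_line_py_loop, hd]
      rw [hA]
      have hdelta : d + (PySem.Str.count (PySem.List.pyGetD ((PySem.Str.split? l "//").getD []) 0 "") "{" : Int)
                 - (PySem.Str.count (PySem.List.pyGetD ((PySem.Str.split? l "//").getD []) 0 "") "}" : Int)
          = d + get_last_line_delta l := by
        simp [get_last_line_delta]; ring
      rw [hdelta, ih]
      cases hix : PySem.List.index? (get_last_line_scan (d + get_last_line_delta l) rest).dropLast 0 with
      | none => simp
      | some j =>
        simp only [Option.map_some]
        have h1 : PySem.List.pyGetD (l :: rest) ((j : Int) + 1) ""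
            = PySem.List.pyGetD rest (j : Int) "" := by
          have : ((j : Int) + 1) = ((j + 1 : Nat) : Int) := by push_cast; ring
          rw [this, PySem.List.pyGetD_natCast, PySem.List.pyGetD_natCast]
          simp
        have h2 : ((j + 1 : Nat) : Int) = (j : Int) + 1 := by push_cast; ring
        rw [h2, h1]
        split_ifs <;> ring

lemma scan_dropLast_index_spec (text : String) (start_line : Int) :
    get_last_line_py text start_line = get_last_line_py_alt text start_line := by
  unfold get_last_line_py get_last_line_py_alt
  simp only []
  rw [show [get_last_line_delta (PySem.List.pyGetD ((PySem.Str.split? text "\n").getD []) (start_line - 1) "")]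
      = ([] : List Int) ++ [get_last_line_delta (PySem.List.pyGetD ((PySem.Str.split? text "\n").getD []) (start_line - 1) "")] from rfl]
  rw [foldl_eq_scan]
  rw [List.nil_append, PySem.List.slice_to_neg_one]
  have hd : ((PySem.Str.count (PySem.List.pyGetD ((PySem.Str.split? (PySem.List.pyGetD ((PySem.Str.split? text "\n").getD []) (start_line - 1) "") "//").getD []) 0 "") "{" : Int)
      - (PySem.Str.count (PySem.List.pyGetD ((PySem.Str.split? (PySem.List.pyGetD ((PySem.Str.split? text "\n").getD []) (start_line - 1) "") "//").getD []) 0 "") "}" : Int))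
      = get_last_line_delta (PySem.List.pyGetD ((PySem.Str.split? text "\n").getD []) (start_line - 1) "") := rfl
  rw [hd, loop_eq_search]

-- ===== VERDICT (by name: the statement is the Claim_ definition above) =====
theorem get_last_line_py_spec : Claim_equal_get_last_line_py := by
  intro text start_line _ _
  unfold Spec_get_last_line_py
  exact scan_dropLast_index_spec text start_line
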